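-- pv_equiv track=rewrite | github.com/CypherGuy/AOCode | Code/main.py | add_newlines_after_second_dash
-- ===== SOURCE A (Python) =====
-- def add_newlines_after_second_dash(text: str) -> str:
--     """Add two newlines after the second occurrence of '---' in the text."""
--     dash_count = 0
--     result = ""
--     i = 0
--
--     while i < len(text):
--         if text[i:i+3] == "---":
--             result += "---"
--             dash_count += 1
--             i += 3
--
--             if dash_count == 2:
--                 # Add two newlines after the second "---"
--                 result += "\n\n"
--         else:
--             result += text[i]
--             i += 1
--
--     return result
-- ===== SOURCE B (Python) =====
-- def add_newlines_after_second_dash(text: str) -> str: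
--     """Add two newlines after the second occurrence of '---' in the text."""
--     parts = text.split("---")
--     if len(parts) < 3:
--         return text
--     return parts[0] + "---" + parts[1] + "---\n\n" + "---".join(parts[2:])
-- ===== Notes on version B (the rewrite author's own statement) =====
-- stated objective: faster
-- what changed: Replaces the character-by-character counting scan that rebuilds the string one piece at a time via repeated string concatenation with a single str.split('---') into segments followed by one rejoin that inserts the two newlines after the second delimiter.
import Mathlib
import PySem

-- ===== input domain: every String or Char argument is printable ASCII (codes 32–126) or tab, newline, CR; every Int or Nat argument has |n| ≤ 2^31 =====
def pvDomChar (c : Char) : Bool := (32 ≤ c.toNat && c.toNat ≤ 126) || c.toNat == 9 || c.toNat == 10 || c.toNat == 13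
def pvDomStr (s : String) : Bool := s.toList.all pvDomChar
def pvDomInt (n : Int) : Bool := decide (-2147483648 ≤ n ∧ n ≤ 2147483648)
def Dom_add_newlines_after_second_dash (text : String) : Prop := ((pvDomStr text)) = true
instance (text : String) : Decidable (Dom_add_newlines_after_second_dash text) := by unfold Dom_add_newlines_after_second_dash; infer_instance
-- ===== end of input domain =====

-- B replaces A's character-by-character quadratic concatenation scan with one split("---") and one rejoin; objective: faster (measured).

-- ===== PORT A =====
-- A's while loop over index i: at each step 'text[i:i+3] == "---"' is ported as a
-- head-pattern match on the remaining characters (exact: Python's slice clamps, so the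
-- test holds iff the next three characters are '-','-','-'); 'result += …' is the
-- accumulator 'res'; 'dash_count' is 'cnt'.
def addNlGoA : List Char → Nat → List Char → List Char
  | '-' :: '-' :: '-' :: t, cnt, res =>
      if cnt + 1 = 2 then addNlGoA t (cnt + 1) (res ++ ['-', '-', '-'] ++ ['\n', '\n'])
      else addNlGoA t (cnt + 1) (res ++ ['-', '-', '-'])
  | c :: t, cnt, res => addNlGoA t cnt (res ++ [c])
  | [], _, res => res

def add_newlines_after_second_dash (text : String) : String :=
  String.ofList (addNlGoA text.toList 0 [])

-- ===== PORT B =====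
-- Source B: parts = text.split("---") (sep "---" ≠ "", so split is PySem.Chars.splitOn);
-- if len(parts) < 3 return text; else rejoin with the two newlines after the second "---".
def add_newlines_after_second_dash_alt (text : String) : String :=
  let parts := PySem.Chars.splitOn text.toList ['-', '-', '-']
  if parts.length < 3 then text
  else
    String.ofList (parts.getD 0 [] ++ ['-', '-', '-'] ++ parts.getD 1 []
      ++ ['-', '-', '-', '\n', '\n'] ++ PySem.Chars.join ['-', '-', '-'] (parts.drop 2))

-- ===== PRECONDITION & SPEC =====
def Spec_add_newlines_after_second_dash (text : String) (out : String) : Prop := out = add_newlines_after_second_dash_alt text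
instance (text : String) (out : String) : Decidable (Spec_add_newlines_after_second_dash text out) := by unfold Spec_add_newlines_after_second_dash; infer_instance

-- ===== CLAIM (what is proved, stated in full; the proofs are below) =====
def Claim_equal_add_newlines_after_second_dash : Prop := ∀ (text : String), Dom_add_newlines_after_second_dash text → Spec_add_newlines_after_second_dash text (add_newlines_after_second_dash text)

-- ===== LEMMAS AND PROOFS =====

-- Reference split: greedy non-overlapping left-to-right split of a character list on "---".
def splitRec : List Char → List (List Char)
  | '-' :: '-' :: '-' :: t => [] :: splitRec t
  | c :: t =>
      match splitRec t with
      | s :: ss => (c :: s) :: ss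
      | [] => [[c]]
  | [] => [[]]

lemma splitRec_ne_nil (l : List Char) : splitRec l ≠ [] := by
  fun_induction splitRec l <;> simp_all

lemma splitRec_cons_ne (c : Char) (t : List Char) (h : ¬((c :: t).take 3 = ['-', '-', '-'])) :
    splitRec (c :: t) = match splitRec t with | s :: ss => (c :: s) :: ss | [] => [[c]] := by
  rw [splitRec.eq_def]
  split
  · rename_i t' heq
    exact absurd (by rw [heq]; rfl) h
  · rename_i c' t' hx heq
    cases heq
    rfl
  · rename_i heq
    exact absurd heq (by simp)

lemma take3_of_not_form (c : Char) (t : List Char)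
    (hx : ∀ t', c = '-' → t = '-' :: '-' :: t' → False) :
    ¬((c :: t).take 3 = ['-', '-', '-']) := by
  intro h
  cases t with
  | nil => simp at h
  | cons c2 t2 =>
    cases t2 with
    | nil => simp at h
    | cons c3 t3 =>
      simp at h
      obtain ⟨h1, h2, h3⟩ := h
      subst h1; subst h2; subst h3
      exact hx t3 rfl rfl

lemma take3_form (l : List Char) (h : l.take 3 = ['-', '-', '-']) :
    l = '-' :: '-' :: '-' :: l.drop 3 := by
  conv_lhs => rw [← List.take_append_drop 3 l, h]
  rfl

lemma splitOn_go_eq (fuel : Nat) :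
    ∀ (l cur : List Char) (acc : List (List Char)), l.length < fuel →
      PySem.Chars.splitOn.go ['-', '-', '-'] fuel l cur acc =
        acc.reverse ++ (match splitRec l with
          | s :: ss => (cur.reverse ++ s) :: ss
          | [] => [cur.reverse]) := by
  induction fuel with
  | zero => intro l cur acc h; omega
  | succ fuel ih =>
    intro l cur acc h
    cases l with
    | nil => rw [PySem.Chars.splitOn.go.eq_def]; simp [splitRec]
    | cons c rest =>
      rw [PySem.Chars.splitOn.go.eq_def]
      show (if (['-', '-', '-'] : List Char).isPrefixOf (c :: rest) = true then
              PySem.Chars.splitOn.go ['-', '-', '-'] fuel (List.drop 3 (c :: rest)) [] (cur.reverse :: acc)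
            else PySem.Chars.splitOn.go ['-', '-', '-'] fuel rest (c :: cur) acc) = _
      by_cases hp : (['-', '-', '-'] : List Char).isPrefixOf (c :: rest) = true
      · rw [if_pos hp]
        have htake : (c :: rest).take 3 = ['-', '-', '-'] := by
          rw [List.isPrefixOf_iff_prefix] at hp
          exact (List.prefix_iff_eq_take.mp hp).symm
        have hform := take3_form _ htake
        have hlen : ((c :: rest).drop 3).length < fuel := by
          simp at h ⊢; omega
        rw [ih ((c :: rest).drop 3) [] (cur.reverse :: acc) hlen]
        obtain ⟨s, ss, hss⟩ := List.exists_cons_of_ne_nil (splitRec_ne_nil ((c :: rest).drop 3))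
        have hsl : splitRec (c :: rest) = [] :: splitRec ((c :: rest).drop 3) := by
          conv_lhs => rw [hform]
          rfl
        rw [hsl, hss]
        simp
      · rw [if_neg hp]
        have hlen : rest.length < fuel := by simp at h; omega
        rw [ih rest (c :: cur) acc hlen]
        have htake : ¬((c :: rest).take 3 = ['-', '-', '-']) := by
          intro hq
          exact hp (by rw [List.isPrefixOf_iff_prefix, List.prefix_iff_eq_take]; simpa using hq.symm)
        rw [splitRec_cons_ne c rest htake]
        obtain ⟨s, ss, hss⟩ := List.exists_cons_of_ne_nil (splitRec_ne_nil rest)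
        rw [hss]
        simp

lemma splitOn_eq (l : List Char) :
    PySem.Chars.splitOn l ['-', '-', '-'] = splitRec l := by
  show PySem.Chars.splitOn.go ['-', '-', '-'] (l.length + 1) l [] [] = splitRec l
  rw [splitOn_go_eq (l.length + 1) l [] [] (by omega)]
  obtain ⟨s, ss, hss⟩ := List.exists_cons_of_ne_nil (splitRec_ne_nil l)
  rw [hss]
  simp

lemma join_splitRec (l : List Char) :
    PySem.Chars.join ['-', '-', '-'] (splitRec l) = l := by
  fun_induction splitRec l with
  | case1 t ih =>
    obtain ⟨s, ss, hss⟩ := List.exists_cons_of_ne_nil (splitRec_ne_nil t)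
    rw [hss] at ih ⊢
    rw [PySem.Chars.join_cons_cons]
    simp [ih]
  | case2 c t hx s ss hss ih =>
    rw [hss] at ih
    cases ss with
    | nil => rw [PySem.Chars.join_singleton] at ih ⊢; simp [ih]
    | cons s2 ss2 =>
      rw [PySem.Chars.join_cons_cons] at ih ⊢
      simp_all
  | case3 c t hx hss ih => exact absurd hss (splitRec_ne_nil t)
  | case4 => simp [PySem.Chars.join_singleton]

-- What A's scan rebuilds from the segments, as a function of how many "---" it has already seen.
def rebuild1 : List (List Char) → List Char
  | [s] => s
  | s :: ss => s ++ ['-', '-', '-', '\n', '\n'] ++ PySem.Chars.join ['-', '-', '-'] ss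
  | [] => []

def rebuild0 : List (List Char) → List Char
  | [s] => s
  | s :: ss => s ++ ['-', '-', '-'] ++ rebuild1 ss
  | [] => []

def rebuildC (cnt : Nat) : List (List Char) → List Char :=
  if cnt = 0 then rebuild0 else if cnt = 1 then rebuild1 else PySem.Chars.join ['-', '-', '-']

lemma rebuildC_cons_head (cnt : Nat) (c : Char) (s : List Char) (ss : List (List Char)) :
    rebuildC cnt ((c :: s) :: ss) = c :: rebuildC cnt (s :: ss) := by
  rcases cnt with _ | _ | n <;> cases ss <;>
    simp [rebuildC, rebuild0, rebuild1, PySem.Chars.join_singleton, PySem.Chars.join_cons_cons]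

lemma goA_spec (l : List Char) (cnt : Nat) (res : List Char) :
    addNlGoA l cnt res = res ++ rebuildC cnt (splitRec l) := by
  fun_induction addNlGoA l cnt res with
  | case1 t cnt res h2 ih =>
    -- dash seen, cnt + 1 = 2, i.e. cnt = 1
    have hc : cnt = 1 := by omega
    subst hc
    obtain ⟨s, ss, hss⟩ := List.exists_cons_of_ne_nil (splitRec_ne_nil t)
    have hsl : splitRec ('-' :: '-' :: '-' :: t) = [] :: splitRec t := rfl
    rw [ih, hsl, hss]
    cases ss with
    | nil =>
      simp [rebuildC, rebuild1, PySem.Chars.join_singleton]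
    | cons s2 ss2 =>
      simp [rebuildC, rebuild1]
  | case2 t cnt res h2 ih =>
    -- dash seen, cnt + 1 ≠ 2
    obtain ⟨s, ss, hss⟩ := List.exists_cons_of_ne_nil (splitRec_ne_nil t)
    have hsl : splitRec ('-' :: '-' :: '-' :: t) = [] :: splitRec t := rfl
    rw [ih, hsl, hss]
    rcases cnt with _ | _ | n
    · -- cnt = 0 → cnt + 1 = 1
      cases ss <;> simp [rebuildC, rebuild0, rebuild1]
    · omega
    · -- cnt ≥ 2
      cases ss <;>
        simp [rebuildC, PySem.Chars.join_singleton, PySem.Chars.join_cons_cons]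
  | case3 c t cnt res hx ih =>
    have htake := take3_of_not_form c t (fun t' h1 h2 => hx t' h1 h2)
    rw [ih, splitRec_cons_ne c t htake]
    obtain ⟨s, ss, hss⟩ := List.exists_cons_of_ne_nil (splitRec_ne_nil t)
    rw [hss]
    simp [rebuildC_cons_head]
  | case4 cnt res =>
    rcases cnt with _ | _ | n <;>
      simp [splitRec, rebuildC, rebuild0, rebuild1, PySem.Chars.join_singleton]

-- ===== VERDICT (by name: the statement is the Claim_ definition above) =====
theorem add_newlines_after_second_dash_spec : Claim_equal_add_newlines_after_second_dash := by
  intro text _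
  unfold Spec_add_newlines_after_second_dash add_newlines_after_second_dash add_newlines_after_second_dash_alt
  rw [splitOn_eq, goA_spec]
  obtain ⟨s, ss, hss⟩ := List.exists_cons_of_ne_nil (splitRec_ne_nil text.toList)
  rw [hss]
  cases ss with
  | nil =>
    -- one segment: no "---" at all; A rebuilds the text unchanged
    have hj := join_splitRec text.toList
    rw [hss, PySem.Chars.join_singleton] at hj
    simp [rebuildC, rebuild0, hj]
  | cons s1 ss1 =>
    cases ss1 with
    | nil =>
      -- two segments: exactly one "---"
      have hj := join_splitRec text.toList
      rw [hss, PySem.Chars.join_cons_cons, PySem.Chars.join_singleton] at hj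
      have hrb : rebuildC 0 [s, s1] = text.toList := by
        simpa [rebuildC, rebuild0, rebuild1] using hj
      rw [hrb]
      simp
    | cons s2 ss2 =>
      -- at least three segments: two newlines go in after the second "---"
      simp [rebuildC, rebuild0, rebuild1]
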